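-- pv_equiv track=rewrite | github.com/tslever/Foundations_Of_Computer_Science | Module_6--Advanced_Algorithms/tile_trominoes.py | tile_board
-- ===== SOURCE A (Python) =====
-- from itertools import count
-- from typing import List
--
-- def tile_board(size: int, hole_r: int, hole_c: int) -> List[List[int]]:
--     """Return an integer matrix representing a tromino tiling.
--
--     Parameters
--     ----------
--     size   : power-of-two board dimension (2, 4, 8, …)
--     hole_r : row index (0-based) of the missing square
--     hole_c : column index (0-based) of the missing square
--     """
--     assert size & (size - 1) == 0 and size >= 2, "size must be a power of two ≥ 2"
--     board = [[0] * size for _ in range(size)]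
--     next_id = count(1)                       # unique label generator for trominoes
--
--     def fill(sr: int, sc: int, d: int, hr: int, hc: int):
--         """
--         sr, sc : top-left corner of current sub-board
--         d      : dimension of current sub-board
--         hr, hc : coordinates of the hole relative to the whole board
--         """
--         if d == 2:                           # -------- base case --------
--             t_id = next(next_id)
--             for r in range(sr, sr + 2):
--                 for c in range(sc, sc + 2):
--                     if (r, c) != (hr, hc):
--                         board[r][c] = t_id
--             return
--
--         # -------- recursive case --------
--         mid = d // 2
--         # indices of quadrant holes (initially the real hole only)
--         quad_holes = [[sr + mid - 1, sc + mid - 1],   # top-left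
--                       [sr + mid - 1, sc + mid],       # top-right
--                       [sr + mid,     sc + mid - 1],   # bottom-left
--                       [sr + mid,     sc + mid]]       # bottom-right
--
--         # Which quadrant already contains the real hole?
--         quad = (hr >= sr + mid) * 2 + (hc >= sc + mid)
--         quad_holes[quad] = [hr, hc]       # keep the genuine hole in its quadrant
--
--         # Place central tromino covering the other three quadrants’ centres
--         t_id = next(next_id)
--         for k, (r, c) in enumerate(quad_holes):
--             if k != quad:
--                 board[r][c] = t_id
--
--         # Recurse into four quadrants
--         for k in range(4):
--             dr = sr + (k // 2) * mid
--             dc = sc + (k % 2) * mid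
--             hr_sub, hc_sub = quad_holes[k]
--             fill(dr, dc, mid, hr_sub, hc_sub)
--
--     fill(0, 0, size, hole_r, hole_c)
--     return board
-- ===== SOURCE B (Python) =====
-- def tile_board(size, hole_r, hole_c):
--     """Tromino tiling, computed iteratively with an explicit frame stack
--     instead of recursion; frames are pushed in reverse so they are processed
--     in the recursive pre-order, which keeps labels identical."""
--     assert size & (size - 1) == 0 and size >= 2, "size must be a power of two ≥ 2"
--     board = [[0] * size for _ in range(size)]
--     next_id = 1
--     stack = [(0, 0, size, hole_r, hole_c)]
--     while stack:
--         sr, sc, d, hr, hc = stack.pop()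
--         if d == 2:
--             for r in (sr, sr + 1):
--                 for c in (sc, sc + 1):
--                     if (r, c) != (hr, hc):
--                         board[r][c] = next_id
--             next_id += 1
--             continue
--         mid = d // 2
--         quad = (hr >= sr + mid) * 2 + (hc >= sc + mid)
--         holes = [(sr + mid - 1, sc + mid - 1), (sr + mid - 1, sc + mid),
--                  (sr + mid, sc + mid - 1), (sr + mid, sc + mid)]
--         holes[quad] = (hr, hc)
--         for k in (0, 1, 2, 3):
--             if k != quad:
--                 r, c = holes[k]
--                 board[r][c] = next_id
--         next_id += 1
--         for k in (3, 2, 1, 0):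
--             qr, qc = divmod(k, 2)
--             stack.append((sr + qr * mid, sc + qc * mid, mid, holes[k][0], holes[k][1]))
--     return board
-- ===== Notes on version B (the rewrite author's own statement) =====
-- stated objective: alternative
-- what changed: The divide-and-conquer recursion (nested fill closure plus itertools.count) is replaced by an explicit stack-based loop over (sr,sc,d,hr,hc) frames with a plain integer id counter; frames are pushed in reverse so the pre-order label sequence and board are identical.
import Mathlib
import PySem

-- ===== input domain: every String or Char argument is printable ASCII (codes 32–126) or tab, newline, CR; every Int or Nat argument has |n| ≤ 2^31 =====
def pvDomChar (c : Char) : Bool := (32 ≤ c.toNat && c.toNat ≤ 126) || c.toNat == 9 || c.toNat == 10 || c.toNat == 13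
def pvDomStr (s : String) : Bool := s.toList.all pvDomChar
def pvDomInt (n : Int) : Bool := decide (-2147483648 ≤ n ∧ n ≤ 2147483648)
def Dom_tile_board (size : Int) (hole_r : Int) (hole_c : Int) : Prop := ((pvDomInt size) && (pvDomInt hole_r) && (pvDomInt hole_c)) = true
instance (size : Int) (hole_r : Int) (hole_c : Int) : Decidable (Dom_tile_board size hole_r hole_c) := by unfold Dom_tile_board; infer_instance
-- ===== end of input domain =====

-- B replaces A's divide-and-conquer recursion (nested `fill` + itertools.count) by an
-- explicit stack-based loop over frames with a plain counter; objective: alternative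
-- decomposition, same board and labels, same asymptotic cost.

-- board[r][c] = v.  Every write in both programs targets quadrant-centre / base-block
-- cells, whose indices are nonnegative and in range, so plain Nat indexing is exact here.
def pvSetCell (b : List (List Int)) (r c v : Int) : List (List Int) :=
  b.set r.toNat ((b.getD r.toNat []).set c.toNat v)

-- ===== PORT A =====
-- literal port of A's nested `fill`; the (board, next_id) pair threads the mutable state,
-- the Nat fuel only makes the recursion structural (d halves each level, so fuel
-- size.toNat is never exhausted on the power-of-two inputs Pre_ admits).

-- the base-case double loop `for r in range(sr, sr+2): for c in range(sc, sc+2): …`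
def pvBaseA (b : List (List Int)) (n sr sc hr hc : Int) : List (List Int) :=
  (PySem.List.pyRange sr (sr+2) 1).foldl (fun b r =>
    (PySem.List.pyRange sc (sc+2) 1).foldl (fun b c =>
      if (r, c) ≠ (hr, hc) then pvSetCell b r c n else b) b) b

-- `quad = (hr >= sr + mid) * 2 + (hc >= sc + mid)`
def pvQuadA (sr sc mid hr hc : Int) : Int :=
  (if hr ≥ sr + mid then 1 else 0) * 2 + (if hc ≥ sc + mid then 1 else 0)

-- `quad_holes` after `quad_holes[quad] = [hr, hc]`
def pvHolesA (sr sc mid hr hc : Int) : List (Int × Int) :=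
  [(sr+mid-1, sc+mid-1), (sr+mid-1, sc+mid), (sr+mid, sc+mid-1), (sr+mid, sc+mid)].set
    (pvQuadA sr sc mid hr hc).toNat (hr, hc)

-- `for k, (r, c) in enumerate(quad_holes): if k != quad: board[r][c] = t_id`
def pvCentreA (b : List (List Int)) (n quad : Int) (qh : List (Int × Int)) : List (List Int) :=
  (PySem.List.enumerate qh).foldl (fun b p =>
    if p.1 ≠ quad then pvSetCell b p.2.1 p.2.2 n else b) b

def pvFillA : Nat → List (List Int) → Int → Int → Int → Int → Int → Int → List (List Int) × Int
  | 0, b, n, _, _, _, _, _ => (b, n)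
  | fa+1, b, n, sr, sc, d, hr, hc =>
    if d = 2 then
      (pvBaseA b n sr sc hr hc, n + 1)
    else
      let mid := PySem.Int.floordiv d 2
      let quad := pvQuadA sr sc mid hr hc
      let qh := pvHolesA sr sc mid hr hc
      let b := pvCentreA b n quad qh
      -- `for k in range(4): … fill(dr, dc, mid, hr_sub, hc_sub)`
      (PySem.List.pyRange 0 4 1).foldl (fun (p : List (List Int) × Int) k =>
        pvFillA fa p.1 p.2 (sr + (PySem.Int.floordiv k 2) * mid)
          (sc + (PySem.Int.mod k 2) * mid) mid
          (PySem.List.pyGetD qh k (0,0)).1 (PySem.List.pyGetD qh k (0,0)).2) (b, n + 1)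

def tile_board (size : Int) (hole_r : Int) (hole_c : Int) : List (List Int) :=
  let b0 := List.replicate size.toNat (List.replicate size.toNat (0 : Int))
  (pvFillA size.toNat b0 1 0 0 size hole_r hole_c).1

-- ===== PORT B =====
-- literal port of Source B's while-loop over the explicit frame stack; the fuel bounds the
-- number of pops (< size² for the power-of-two inputs Pre_ admits).

-- `for r in (sr, sr+1): for c in (sc, sc+1): …`
def pvBaseB (b : List (List Int)) (n sr sc hr hc : Int) : List (List Int) :=
  ([sr, sr+1] : List Int).foldl (fun b r =>
    ([sc, sc+1] : List Int).foldl (fun b c =>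
      if (r, c) ≠ (hr, hc) then pvSetCell b r c n else b) b) b

def pvQuadB (sr sc mid hr hc : Int) : Int :=
  (if hr ≥ sr + mid then 1 else 0) * 2 + (if hc ≥ sc + mid then 1 else 0)

-- `holes` after `holes[quad] = (hr, hc)`
def pvHolesB (sr sc mid hr hc : Int) : List (Int × Int) :=
  [(sr+mid-1, sc+mid-1), (sr+mid-1, sc+mid), (sr+mid, sc+mid-1), (sr+mid, sc+mid)].set
    (pvQuadB sr sc mid hr hc).toNat (hr, hc)

-- `for k in (0, 1, 2, 3): if k != quad: r, c = holes[k]; board[r][c] = next_id`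
def pvCentreB (b : List (List Int)) (n quad : Int) (holes : List (Int × Int)) : List (List Int) :=
  ([0, 1, 2, 3] : List Int).foldl (fun b k =>
    if k ≠ quad then
      pvSetCell b (PySem.List.pyGetD holes k (0,0)).1 (PySem.List.pyGetD holes k (0,0)).2 n
    else b) b

-- the frame pushed for quadrant k: `(sr + qr*mid, sc + qc*mid, mid, *holes[k])`
def pvFrameB (sr sc mid : Int) (holes : List (Int × Int)) (k : Int) : Int × Int × Int × Int × Int :=
  (sr + (PySem.Int.floordiv k 2) * mid, sc + (PySem.Int.mod k 2) * mid, mid,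
    (PySem.List.pyGetD holes k (0,0)).1, (PySem.List.pyGetD holes k (0,0)).2)

def pvLoopB : Nat → List (List Int) → Int → List (Int × Int × Int × Int × Int) → List (List Int) × Int
  | 0, b, n, _ => (b, n)
  | _+1, b, n, [] => (b, n)
  | f+1, b, n, fr :: st =>
    let sr := fr.1; let sc := fr.2.1; let d := fr.2.2.1; let hr := fr.2.2.2.1; let hc := fr.2.2.2.2
    if d = 2 then
      pvLoopB f (pvBaseB b n sr sc hr hc) (n + 1) st
    else
      let mid := PySem.Int.floordiv d 2
      let quad := pvQuadB sr sc mid hr hc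
      let holes := pvHolesB sr sc mid hr hc
      -- `for k in (3, 2, 1, 0): stack.append(…)`
      pvLoopB f (pvCentreB b n quad holes) (n + 1)
        (([3, 2, 1, 0] : List Int).foldl (fun st k => pvFrameB sr sc mid holes k :: st) st)

def tile_board_alt (size : Int) (hole_r : Int) (hole_c : Int) : List (List Int) :=
  let b0 := List.replicate size.toNat (List.replicate size.toNat (0 : Int))
  (pvLoopB (size.toNat * size.toNat) b0 1 [(0, 0, size, hole_r, hole_c)]).1

-- ===== PRECONDITION & SPEC =====
-- A's assert raises AssertionError unless size is a power of two ≥ 2; exactly those inputs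
-- are excluded (the hole coordinates are unconstrained: neither program ever indexes with them).
def Pre_tile_board (size : Int) (hole_r : Int) (hole_c : Int) : Prop :=
  2 ≤ size ∧ size = (2 : Int) ^ Nat.log2 size.toNat
instance (size : Int) (hole_r : Int) (hole_c : Int) : Decidable (Pre_tile_board size hole_r hole_c) := by unfold Pre_tile_board; infer_instance
def pvWitness_tile_board : Int × Int × Int := (4, 1, 2)

def Spec_tile_board (size : Int) (hole_r : Int) (hole_c : Int) (out : List (List Int)) : Prop := out = tile_board_alt size hole_r hole_c
instance (size : Int) (hole_r : Int) (hole_c : Int) (out : List (List Int)) : Decidable (Spec_tile_board size hole_r hole_c out) := by unfold Spec_tile_board; infer_instance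

-- ===== CLAIM (what is proved, stated in full; the proofs are below) =====
def Claim_equal_tile_board : Prop := ∀ (size : Int) (hole_r : Int) (hole_c : Int), Dom_tile_board size hole_r hole_c → Pre_tile_board size hole_r hole_c → Spec_tile_board size hole_r hole_c (tile_board size hole_r hole_c)

-- ===== LEMMAS AND PROOFS =====

-- number of frame pops B performs on a 2^k sub-board
def pvCost : Nat → Nat
  | 0 => 0
  | 1 => 1
  | (k+2) => 1 + 4 * pvCost (k+1)

lemma pvCost_lt (k : Nat) : pvCost k < 4 ^ k := by
  induction k with
  | zero => simp [pvCost]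
  | succ j ih =>
    cases j with
    | zero => simp [pvCost]
    | succ i =>
      have : pvCost (i+1) < 4 ^ (i+1) := ih
      simp only [pvCost, pow_succ]
      omega

lemma pvRange_two (a : Int) : PySem.List.pyRange a (a+2) 1 = [a, a+1] := by
  rw [PySem.List.pyRange_one_cons (by omega), PySem.List.pyRange_one_cons (by omega),
    PySem.List.pyRange_one_eq_nil (by omega)]

lemma pvBase_eq (b : List (List Int)) (n sr sc hr hc : Int) :
    pvBaseA b n sr sc hr hc = pvBaseB b n sr sc hr hc := by
  unfold pvBaseA pvBaseB
  rw [show PySem.List.pyRange sr (sr+2) 1 = [sr, sr+1] from pvRange_two sr,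
    show PySem.List.pyRange sc (sc+2) 1 = [sc, sc+1] from pvRange_two sc]

lemma pvQuad_eq (sr sc mid hr hc : Int) : pvQuadA sr sc mid hr hc = pvQuadB sr sc mid hr hc := rfl

lemma pvHoles_eq (sr sc mid hr hc : Int) : pvHolesA sr sc mid hr hc = pvHolesB sr sc mid hr hc := rfl

lemma pvCentre_eq (b : List (List Int)) (n quad : Int) (qh : List (Int × Int))
    (hl : qh.length = 4) : pvCentreA b n quad qh = pvCentreB b n quad qh := by
  rcases qh with _ | ⟨a0, _ | ⟨a1, _ | ⟨a2, _ | ⟨a3, _ | ⟨a4, t⟩⟩⟩⟩⟩ <;> simp_all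
  simp [pvCentreA, pvCentreB, PySem.List.pyGetD, PySem.List.pyGet?, PySem.List.pyIdx?, List.foldl]

lemma pvHolesB_len (sr sc mid hr hc : Int) : (pvHolesB sr sc mid hr hc).length = 4 := by
  simp [pvHolesB]

lemma pvMid (j : Nat) : PySem.Int.floordiv ((2:Int) ^ (j+1+1)) 2 = (2:Int) ^ (j+1) := by
  rw [PySem.Int.floordiv_eq_ediv_of_pos (by norm_num), pow_succ]
  exact Int.mul_ediv_cancel _ (by norm_num)

lemma pvTwoPow_ne_two (j : Nat) : ((2:Int) ^ (j+1+1)) ≠ 2 := by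
  intro h
  have h4 : (4:Int) ≤ 2 ^ (j+1+1) := by
    calc (4:Int) = 2 ^ 2 := by norm_num
    _ ≤ 2 ^ (j+1+1) := pow_le_pow_right₀ (by norm_num) (by omega)
  omega

lemma pvLoopB_nil (f : Nat) (b : List (List Int)) (n : Int) :
    pvLoopB f b n [] = (b, n) := by
  cases f <;> simp [pvLoopB]

-- one-step unfolding lemmas (fuel kept symbolic so rewriting unfolds exactly one level)
lemma pvFillA_two (fa : Nat) (b : List (List Int)) (n sr sc hr hc : Int) :
    pvFillA (fa+1) b n sr sc 2 hr hc = (pvBaseA b n sr sc hr hc, n + 1) := by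
  simp [pvFillA]

lemma pvFillA_rec (fa : Nat) (b : List (List Int)) (n sr sc d hr hc : Int) (hd : d ≠ 2) :
    pvFillA (fa+1) b n sr sc d hr hc =
      (PySem.List.pyRange 0 4 1).foldl (fun (p : List (List Int) × Int) k =>
        pvFillA fa p.1 p.2 (sr + (PySem.Int.floordiv k 2) * (PySem.Int.floordiv d 2))
          (sc + (PySem.Int.mod k 2) * (PySem.Int.floordiv d 2)) (PySem.Int.floordiv d 2)
          (PySem.List.pyGetD (pvHolesA sr sc (PySem.Int.floordiv d 2) hr hc) k (0,0)).1
          (PySem.List.pyGetD (pvHolesA sr sc (PySem.Int.floordiv d 2) hr hc) k (0,0)).2)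
        (pvCentreA b n (pvQuadA sr sc (PySem.Int.floordiv d 2) hr hc)
          (pvHolesA sr sc (PySem.Int.floordiv d 2) hr hc), n + 1) := by
  simp only [pvFillA, if_neg hd]

lemma pvLoopB_two (f : Nat) (b : List (List Int)) (n sr sc hr hc : Int)
    (st : List (Int × Int × Int × Int × Int)) :
    pvLoopB (f+1) b n ((sr, sc, 2, hr, hc) :: st)
      = pvLoopB f (pvBaseB b n sr sc hr hc) (n + 1) st := by
  simp [pvLoopB]

lemma pvLoopB_rec (f : Nat) (b : List (List Int)) (n sr sc d hr hc : Int)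
    (st : List (Int × Int × Int × Int × Int)) (hd : d ≠ 2) :
    pvLoopB (f+1) b n ((sr, sc, d, hr, hc) :: st)
      = pvLoopB f (pvCentreB b n (pvQuadB sr sc (PySem.Int.floordiv d 2) hr hc)
            (pvHolesB sr sc (PySem.Int.floordiv d 2) hr hc)) (n + 1)
          (pvFrameB sr sc (PySem.Int.floordiv d 2) (pvHolesB sr sc (PySem.Int.floordiv d 2) hr hc) 0 ::
           pvFrameB sr sc (PySem.Int.floordiv d 2) (pvHolesB sr sc (PySem.Int.floordiv d 2) hr hc) 1 ::
           pvFrameB sr sc (PySem.Int.floordiv d 2) (pvHolesB sr sc (PySem.Int.floordiv d 2) hr hc) 2 ::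
           pvFrameB sr sc (PySem.Int.floordiv d 2) (pvHolesB sr sc (PySem.Int.floordiv d 2) hr hc) 3 :: st) := by
  simp only [pvLoopB, if_neg hd, List.foldl]

-- A's result does not depend on the fuel, as long as it covers the recursion depth
set_option maxHeartbeats 4000000 in
lemma pvFillA_fuel : ∀ (k : Nat), 1 ≤ k → ∀ (fa : Nat), k ≤ fa →
    ∀ b n sr sc hr hc, pvFillA fa b n sr sc ((2:Int)^k) hr hc = pvFillA k b n sr sc ((2:Int)^k) hr hc := by
  intro k
  induction k with
  | zero => omega
  | succ j ih =>
    intro _ fa hfa b n sr sc hr hc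
    obtain ⟨f, rfl⟩ : ∃ f, fa = f + 1 := ⟨fa - 1, by omega⟩
    cases j with
    | zero =>
      rw [show ((2:Int)) ^ (0+1) = 2 by norm_num, pvFillA_two, pvFillA_two]
    | succ i =>
      have hne := pvTwoPow_ne_two i
      have ihf := ih (by omega) f (by omega)
      rw [pvFillA_rec f _ _ _ _ _ _ _ hne, pvFillA_rec (i+1) _ _ _ _ _ _ _ hne, pvMid i,
        show PySem.List.pyRange 0 4 1 = [0,1,2,3] by decide]
      simp only [List.foldl]
      simp only [ihf]

-- main simulation: one recursive call of A = pvCost k pops of B's stack loop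
set_option maxHeartbeats 4000000 in
lemma pvKey : ∀ (k : Nat), 1 ≤ k → ∀ (fb : Nat) b n sr sc hr hc st,
    pvLoopB (fb + pvCost k) b n ((sr, sc, (2:Int)^k, hr, hc) :: st)
      = pvLoopB fb (pvFillA k b n sr sc ((2:Int)^k) hr hc).1
          (pvFillA k b n sr sc ((2:Int)^k) hr hc).2 st := by
  intro k
  induction k with
  | zero => omega
  | succ j ih =>
    intro _ fb b n sr sc hr hc st
    cases j with
    | zero =>
      rw [show ((2:Int)) ^ (0+1) = 2 by norm_num, show pvCost (0+1) = 1 from rfl,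
        show fb + 1 = fb + 1 from rfl, pvLoopB_two, pvFillA_two, pvBase_eq]
    | succ i =>
      have hne := pvTwoPow_ne_two i
      have ihf := ih (by omega)
      have hcen : ∀ (b : List (List Int)) (n q sr sc mid hr hc : Int),
          pvCentreA b n q (pvHolesB sr sc mid hr hc) = pvCentreB b n q (pvHolesB sr sc mid hr hc) :=
        fun b n q sr sc mid hr hc => pvCentre_eq b n q _ (pvHolesB_len sr sc mid hr hc)
      rw [show fb + pvCost (i+1+1) =
        (fb + pvCost (i+1) + pvCost (i+1) + pvCost (i+1) + pvCost (i+1)) + 1 by simp [pvCost]; omega]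
      rw [pvLoopB_rec _ _ _ _ _ _ _ _ _ hne, pvFillA_rec (i+1) _ _ _ _ _ _ _ hne, pvMid i,
        show PySem.List.pyRange 0 4 1 = [0,1,2,3] by decide]
      simp only [List.foldl, pvFrameB]
      simp only [ihf]
      simp only [pvQuad_eq, pvHoles_eq, hcen]

lemma pvPow (k : Nat) (hk : 1 ≤ k) (hr hc : Int) (b0 : List (List Int)) (fa fb : Nat)
    (hfa : k ≤ fa) (hfb : pvCost k ≤ fb) :
    (pvFillA fa b0 1 0 0 ((2:Int)^k) hr hc).1 = (pvLoopB fb b0 1 [(0, 0, (2:Int)^k, hr, hc)]).1 := by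
  rw [pvFillA_fuel k hk fa hfa, show fb = (fb - pvCost k) + pvCost k by omega,
    pvKey k hk, pvLoopB_nil]

theorem pv_main (size hole_r hole_c : Int) (hpre : Pre_tile_board size hole_r hole_c) :
    tile_board size hole_r hole_c = tile_board_alt size hole_r hole_c := by
  obtain ⟨h2, hpow⟩ := hpre
  set k := Nat.log2 size.toNat with hk
  have hk1 : 1 ≤ k := by
    rcases Nat.eq_zero_or_pos k with h0 | h; · rw [h0] at hpow; omega
    exact h
  have hsz : size.toNat = 2 ^ k := by
    have : size = ((2 ^ k : Nat) : Int) := by push_cast; exact hpow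
    omega
  have h4 : (4:Nat) ^ k = 2 ^ k * 2 ^ k := by
    rw [show (4:Nat) = 2 * 2 from rfl, mul_pow]
  unfold tile_board tile_board_alt
  simp only [hsz]
  rw [show size = (2:Int) ^ k from hpow]
  have hklt : k < 2 ^ k := Nat.lt_two_pow_self
  exact pvPow k hk1 hole_r hole_c _ _ _ (by omega) (by have := pvCost_lt k; omega)

-- ===== VERDICT (by name: the statement is the Claim_ definition above) =====
theorem tile_board_spec : Claim_equal_tile_board := by
  intro size hole_r hole_c _ hpre
  unfold Spec_tile_board
  exact pv_main size hole_r hole_c hpre
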